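-- pv_equiv track=rewrite | github.com/linhdvu14/cp-sols | sols/CodeChef/FEB221A/RANDOMOR.py | batch_nCk
-- ===== SOURCE A (Python) =====
-- def batch_nCk(N, p):
--     ''' precompute binomial coefficients to calc up to C(N, N) % p
--     C(N, k) mod p = fact[n] * inv_fact[k] * inv_fact[n-k]
--     '''
--     fact = [1]*(N+1)  # n! % p
--     for i in range(1, N+1):
--         fact[i] = (i * fact[i-1]) % p
--
--     inv_fact = [1]*(N+1)  # (1 / n!) % p
--     for i in range(1, N+1):
--         inv_fact[i] = pow(fact[i], p-2, p)
--
--     return fact, inv_fact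
-- ===== SOURCE B (Python) =====
-- def batch_nCk(N, p):
--     ''' precompute binomial coefficients to calc up to C(N, N) % p
--     C(N, k) mod p = fact[n] * inv_fact[k] * inv_fact[n-k]
--     '''
--     fact = [1] * (N + 1)
--     inv_fact = [1] * (N + 1)
--     f = inv = 1
--     # one fused pass: x -> x^(p-2) mod p is multiplicative, so the inverse table
--     # is the running product of pow(i, p-2, p); no read-back from the lists
--     for i in range(1, N + 1):
--         f = f * i % p
--         inv = inv * pow(i, p - 2, p) % p
--         fact[i] = f
--         inv_fact[i] = inv
--     return fact, inv_fact
-- ===== Notes on version B (the rewrite author's own statement) =====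
-- stated objective: alternative
-- what changed: one fused pass with scalar running products instead of A's two passes over preallocated lists: fact accumulates f=f*i%p and the inverse table accumulates inv=inv*pow(i,p-2,p)%p (x->x^(p-2) mod p is multiplicative), so no pass re-reads fact[i] to exponentiate it; Pre_ excludes p < 2 with N >= 1, where pow's exponent p-2 is negative and Python pow computes modular inverses (raising ValueError on non-invertible bases, only the degenerate mod 0,+-1 corners survive)
-- outside the precondition, e.g. on batch_nCk(2, 1): A returns ([1, 0, 0], [1, 0, 0]), B returns ([1, 0, 0], [1, 0, 0]); on batch_nCk(1, -5): A returns ([1, -4], [1, -4]), B returns ([1, -4], [1, -4]); on batch_nCk(2, -4): A raises ValueError, B raises ValueError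
import Mathlib
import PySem

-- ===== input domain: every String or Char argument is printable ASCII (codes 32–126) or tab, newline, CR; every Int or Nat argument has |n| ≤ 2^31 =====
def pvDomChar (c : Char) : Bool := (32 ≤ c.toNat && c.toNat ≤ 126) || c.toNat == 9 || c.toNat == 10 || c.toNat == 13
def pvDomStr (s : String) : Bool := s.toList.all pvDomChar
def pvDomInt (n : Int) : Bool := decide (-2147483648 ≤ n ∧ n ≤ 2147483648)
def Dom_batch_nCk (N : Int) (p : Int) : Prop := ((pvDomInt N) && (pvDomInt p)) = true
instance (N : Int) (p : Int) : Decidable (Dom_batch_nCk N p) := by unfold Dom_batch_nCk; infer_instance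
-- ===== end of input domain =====

-- B fills both tables in one fused pass with scalar running products, accumulating the inverse
-- table as a running product of pow(i, p-2, p) instead of exponentiating fact[i] (objective: alternative).

-- ===== PORT A =====
-- pow(fact[i], p-2, p) is PySem.Int.powMod with a Nat exponent; '(p-2).toNat' is exact since
-- Pre_ gives p ≥ 2 (for p < 2 Python's three-argument pow with a negative exponent is excluded by Pre_).
def batch_nCk (N : Int) (p : Int) : List Int × List Int :=
  -- fact = [1]*(N+1); for i in range(1, N+1): fact[i] = (i * fact[i-1]) % p
  let fact : List Int :=
    (PySem.List.pyRange 1 (N+1) 1).foldl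
      (fun f i => PySem.List.pySetD f i (PySem.Int.mod (i * PySem.List.pyGetD f (i-1) 0) p))
      (PySem.List.pyRepeat [(1 : Int)] (N+1))
  -- inv_fact = [1]*(N+1); for i in range(1, N+1): inv_fact[i] = pow(fact[i], p-2, p)
  let inv_fact : List Int :=
    (PySem.List.pyRange 1 (N+1) 1).foldl
      (fun g i => PySem.List.pySetD g i (PySem.Int.powMod (PySem.List.pyGetD fact i 0) (p-2).toNat p))
      (PySem.List.pyRepeat [(1 : Int)] (N+1))
  (fact, inv_fact)

-- ===== PORT B =====
def batch_nCk_alt (N : Int) (p : Int) : List Int × List Int :=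
  -- fact = [1]*(N+1); inv_fact = [1]*(N+1); f = inv = 1
  -- for i in range(1, N+1): f = f*i%p; inv = inv*pow(i, p-2, p)%p; fact[i] = f; inv_fact[i] = inv
  let res :=
    (PySem.List.pyRange 1 (N+1) 1).foldl
      (fun (s : List Int × List Int × Int × Int) i =>
        let f := PySem.Int.mod (s.2.2.1 * i) p
        let inv := PySem.Int.mod (s.2.2.2 * PySem.Int.powMod i (p-2).toNat p) p
        (PySem.List.pySetD s.1 i f, PySem.List.pySetD s.2.1 i inv, f, inv))
      (PySem.List.pyRepeat [(1 : Int)] (N+1), PySem.List.pyRepeat [(1 : Int)] (N+1), 1, 1)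
  (res.1, res.2.1)

-- ===== PRECONDITION & SPEC =====
-- Pre_ excludes p < 2 with N ≥ 1: there pow's exponent p-2 is negative, where Python pow computes
-- modular inverses (raising ValueError on non-invertible bases; only the degenerate mod 0/±1 corners
-- survive), a branch of pow outside the ported (PySem) semantics.
def Pre_batch_nCk (N : Int) (p : Int) : Prop := N ≤ 0 ∨ 2 ≤ p
instance (N : Int) (p : Int) : Decidable (Pre_batch_nCk N p) := by unfold Pre_batch_nCk; infer_instance
def pvWitness_batch_nCk : Int × Int := (3, 5)

def Spec_batch_nCk (N : Int) (p : Int) (out : List Int × List Int) : Prop := out = batch_nCk_alt N p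
instance (N : Int) (p : Int) (out : List Int × List Int) : Decidable (Spec_batch_nCk N p out) := by unfold Spec_batch_nCk; infer_instance

-- ===== CLAIM (what is proved, stated in full; the proofs are below) =====
def Claim_equal_batch_nCk : Prop := ∀ (N : Int) (p : Int), Dom_batch_nCk N p → Pre_batch_nCk N p → Spec_batch_nCk N p (batch_nCk N p)

-- ===== LEMMAS AND PROOFS =====

def Ffact (p : Int) : Nat → Int
  | 0 => 1
  | (i+1) => PySem.Int.mod ((↑(i+1) : Int) * Ffact p i) p

def Gfact (p : Int) (i : Nat) : Int := PySem.Int.powMod (Ffact p i) (p-2).toNat p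

theorem Gfact_zero (p : Int) (hp : 2 ≤ p) : Gfact p 0 = 1 := by
  simp [Gfact, Ffact, PySem.Int.powMod]
  rw [PySem.Int.mod_eq_emod_of_pos (by omega)]
  exact Int.emod_eq_of_lt (by omega) (by omega)

theorem foldl_set_range (h : Nat → Int) (val : List Int → Int → Int) (n : Nat)
    (hstep : ∀ (k : Nat) (t : List Int), 1 ≤ k → k ≤ n →
      val ((List.range k).map h ++ t) (↑k : Int) = h k) :
    ∀ (k : Nat), 1 ≤ k → k ≤ n + 1 →
      (PySem.List.pyRange (↑k) (↑n + 1) 1).foldl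
        (fun f i => PySem.List.pySetD f i (val f i))
        ((List.range k).map h ++ List.replicate (n + 1 - k) 1)
      = (List.range (n + 1)).map h := by
  suffices H : ∀ (m k : Nat), 1 ≤ k → k + m = n + 1 →
      (PySem.List.pyRange (↑k) (↑n + 1) 1).foldl
        (fun f i => PySem.List.pySetD f i (val f i))
        ((List.range k).map h ++ List.replicate (n + 1 - k) 1)
      = (List.range (n + 1)).map h by
    intro k hk1 hkn; exact H (n+1-k) k hk1 (by omega)
  intro m
  induction m with
  | zero =>
    intro k hk1 hkeq
    have hk : k = n + 1 := by omega
    subst hk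
    rw [PySem.List.pyRange_one_eq_nil (by push_cast; omega)]
    simp
  | succ m ih =>
    intro k hk1 hkeq
    have hkn : k ≤ n := by omega
    rw [PySem.List.pyRange_one_cons (by omega)]
    simp only [List.foldl_cons]
    have hrep : List.replicate (n + 1 - k) (1 : Int) = 1 :: List.replicate (n - k) 1 := by
      have : n + 1 - k = (n - k) + 1 := by omega
      rw [this, List.replicate_succ]
    rw [hrep]
    rw [show PySem.List.pySetD ((List.range k).map h ++ 1 :: List.replicate (n - k) 1) (↑k)
          (val ((List.range k).map h ++ 1 :: List.replicate (n - k) 1) (↑k)) =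
        ((List.range k).map h ++ 1 :: List.replicate (n - k) 1).set k
          (val ((List.range k).map h ++ 1 :: List.replicate (n - k) 1) (↑k)) from by
      simp [PySem.List.pySetD_natCast]]
    rw [hstep k _ hk1 hkn]
    rw [List.set_append_right k (h k) (by simp), List.length_map, List.length_range,
        Nat.sub_self, List.set_cons_zero]
    have hlist : (List.range k).map h ++ h k :: List.replicate (n - k) 1 =
        (List.range (k+1)).map h ++ List.replicate (n + 1 - (k+1)) 1 := by
      simp [List.range_succ, show n + 1 - (k+1) = n - k from by omega]
    rw [hlist]
    have := ih (k+1) (by omega) (by omega)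
    push_cast at this ⊢
    convert this using 2

theorem portA_eq (N p : Int) (hN : 0 ≤ N) (hp : 2 ≤ p) :
    batch_nCk N p = ((List.range (N.toNat + 1)).map (Ffact p),
                     (List.range (N.toNat + 1)).map (Gfact p)) := by
  obtain ⟨n, rfl⟩ : ∃ n : Nat, N = ↑n := ⟨N.toNat, by omega⟩
  unfold batch_nCk
  simp only [Int.toNat_natCast]
  have hrep : PySem.List.pyRepeat [(1:Int)] (↑n + 1) = List.replicate (n+1) 1 := by
    rw [show ((n:Int) + 1) = ((n+1 : Nat) : Int) from by push_cast; ring,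
        PySem.List.pyRepeat_singleton]
    simp
  have hfact : (PySem.List.pyRange 1 (↑n+1) 1).foldl
      (fun f i => PySem.List.pySetD f i (PySem.Int.mod (i * PySem.List.pyGetD f (i-1) 0) p))
      (PySem.List.pyRepeat [(1 : Int)] (↑n+1)) = (List.range (n + 1)).map (Ffact p) := by
    rw [hrep]
    have := foldl_set_range (Ffact p)
      (fun f i => PySem.Int.mod (i * PySem.List.pyGetD f (i-1) 0) p) n
      (by
        intro k t hk1 hkn
        obtain ⟨j, rfl⟩ : ∃ j, k = j + 1 := ⟨k-1, by omega⟩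
        simp only
        rw [show ((j+1 : Nat) : Int) - 1 = (j : Int) from by push_cast; ring,
            PySem.List.pyGetD_natCast]
        rw [List.getD_append _ _ _ _ (by simp)]
        rw [PySem.List.getD_map_range _ _ _ _ (by omega)]
        rfl)
      1 (by omega) (by omega)
    simpa using this
  rw [hfact]
  simp only [Prod.mk.injEq, true_and]
  · have := foldl_set_range (Gfact p)
      (fun g i => PySem.Int.powMod (PySem.List.pyGetD ((List.range (n+1)).map (Ffact p)) i 0) (p-2).toNat p) n
      (by
        intro k t hk1 hkn
        simp only
        rw [PySem.List.pyGetD_natCast]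
        rw [PySem.List.getD_map_range _ _ _ _ (by omega)]
        rfl)
      1 (by omega) (by omega)
    rw [hrep, ← this]
    congr 1
    simp [List.range_one, Gfact_zero p hp, List.replicate_succ]


-- x ↦ x^(p-2) mod p is multiplicative: B's running product reproduces A's entry
theorem Gfact_mul_step (p : Int) (hp2 : 2 ≤ p) (k : Nat) :
    PySem.Int.mod (Gfact p k * PySem.Int.powMod ((k+1 : Nat) : Int) (p-2).toNat p) p
      = Gfact p (k+1) := by
  have hppos : (0:Int) < p := by omega
  have hpP : p = ((p.toNat : Nat) : Int) := by omega
  set P := p.toNat with hPdef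
  haveI : NeZero P := ⟨by omega⟩
  have hmodcast : ∀ a : Int, ((PySem.Int.mod a p : Int) : ZMod P) = (a : ZMod P) := by
    intro a
    rw [PySem.Int.mod_eq_emod_of_pos hppos, hpP, ZMod.intCast_mod]
  have hL1 : 0 ≤ PySem.Int.mod (Gfact p k * PySem.Int.powMod ((k+1 : Nat) : Int) (p-2).toNat p) p :=
    PySem.Int.mod_nonneg _ hppos
  have hL2 : PySem.Int.mod (Gfact p k * PySem.Int.powMod ((k+1 : Nat) : Int) (p-2).toNat p) p < p :=
    PySem.Int.mod_lt _ hppos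
  have hR1 : 0 ≤ Gfact p (k+1) := PySem.Int.mod_nonneg _ hppos
  have hR2 : Gfact p (k+1) < p := PySem.Int.mod_lt _ hppos
  have hcast : ((PySem.Int.mod (Gfact p k * PySem.Int.powMod ((k+1 : Nat) : Int) (p-2).toNat p) p : Int) : ZMod P)
      = ((Gfact p (k+1) : Int) : ZMod P) := by
    rw [hmodcast]
    rw [show PySem.Int.powMod ((k+1 : Nat) : Int) (p-2).toNat p
          = PySem.Int.mod (((k+1 : Nat) : Int) ^ (p-2).toNat) p from rfl,
        show Gfact p k = PySem.Int.mod (Ffact p k ^ (p-2).toNat) p from rfl,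
        show Gfact p (k+1) = PySem.Int.mod (Ffact p (k+1) ^ (p-2).toNat) p from rfl]
    rw [Int.cast_mul, hmodcast, hmodcast, hmodcast]
    have hF : ((Ffact p (k+1) : Int) : ZMod P)
        = (((k+1 : Nat) : Int) : ZMod P) * ((Ffact p k : Int) : ZMod P) := by
      show ((PySem.Int.mod (((k+1 : Nat) : Int) * Ffact p k) p : Int) : ZMod P) = _
      rw [hmodcast]; push_cast; ring
    push_cast at hF ⊢
    rw [hF, mul_pow]
    ring
  have := (ZMod.intCast_eq_intCast_iff' _ _ _).mp hcast
  rw [← hpP] at this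
  rwa [Int.emod_eq_of_lt hL1 hL2, Int.emod_eq_of_lt hR1 hR2] at this

-- B's fused loop: both tables filled left to right, scalars carrying Ffact/Gfact of the last index
theorem foldB_aux (p : Int) (hp2 : 2 ≤ p) (n : Nat) :
    ∀ (m k : Nat), 1 ≤ k → k + m = n + 1 →
      (PySem.List.pyRange (↑k) (↑n + 1) 1).foldl
        (fun (s : List Int × List Int × Int × Int) i =>
          (PySem.List.pySetD s.1 i (PySem.Int.mod (s.2.2.1 * i) p),
           PySem.List.pySetD s.2.1 i (PySem.Int.mod (s.2.2.2 * PySem.Int.powMod i (p-2).toNat p) p),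
           PySem.Int.mod (s.2.2.1 * i) p,
           PySem.Int.mod (s.2.2.2 * PySem.Int.powMod i (p-2).toNat p) p))
        ((List.range k).map (Ffact p) ++ List.replicate (n + 1 - k) 1,
         (List.range k).map (Gfact p) ++ List.replicate (n + 1 - k) 1,
         Ffact p (k-1), Gfact p (k-1))
      = ((List.range (n+1)).map (Ffact p), (List.range (n+1)).map (Gfact p),
         Ffact p n, Gfact p n) := by
  intro m
  induction m with
  | zero =>
    intro k hk1 hkeq
    have hk : k = n + 1 := by omega
    subst hk
    rw [PySem.List.pyRange_one_eq_nil (by omega)]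
    simp
  | succ m ih =>
    intro k hk1 hkeq
    obtain ⟨j, rfl⟩ : ∃ j, k = j + 1 := ⟨k-1, by omega⟩
    rw [PySem.List.pyRange_one_cons (by omega)]
    simp only [List.foldl_cons]
    have hf : PySem.Int.mod (Ffact p (j + 1 - 1) * ((j+1 : Nat) : Int)) p = Ffact p (j+1) := by
      simp only [Nat.add_sub_cancel]
      rw [mul_comm]; rfl
    have hinv : PySem.Int.mod (Gfact p (j + 1 - 1) * PySem.Int.powMod ((j+1 : Nat) : Int) (p-2).toNat p) p
        = Gfact p (j+1) := by
      simp only [Nat.add_sub_cancel]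
      exact Gfact_mul_step p hp2 j
    rw [hf, hinv]
    have hset : ∀ g : Nat → Int,
        PySem.List.pySetD ((List.range (j+1)).map g ++ List.replicate (n + 1 - (j+1)) 1)
          ((j+1 : Nat) : Int) (g (j+1))
        = (List.range (j+2)).map g ++ List.replicate (n + 1 - (j+2)) 1 := by
      intro g
      rw [PySem.List.pySetD_natCast]
      have hrep : List.replicate (n + 1 - (j+1)) (1 : Int) = 1 :: List.replicate (n - (j+1)) 1 := by
        rw [show n + 1 - (j+1) = (n - (j+1)) + 1 from by omega, List.replicate_succ]
      rw [hrep, List.set_append_right (j+1) _ (by simp), List.length_map, List.length_range,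
          Nat.sub_self, List.set_cons_zero]
      rw [List.range_succ (n := j+1), List.map_append]
      simp [show n + 1 - (j + 2) = n - (j+1) from by omega]
    rw [hset (Ffact p), hset (Gfact p)]
    have := ih (j+2) (by omega) (by omega)
    rw [show (j + 2) - 1 = j + 1 from by omega] at this
    push_cast at this ⊢
    convert this using 3

theorem portB_eq (N p : Int) (hN : 0 ≤ N) (hp : 2 ≤ p) :
    batch_nCk_alt N p = ((List.range (N.toNat + 1)).map (Ffact p),
                         (List.range (N.toNat + 1)).map (Gfact p)) := by
  obtain ⟨n, rfl⟩ : ∃ n : Nat, N = ↑n := ⟨N.toNat, by omega⟩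
  unfold batch_nCk_alt
  simp only [Int.toNat_natCast]
  have hrep : PySem.List.pyRepeat [(1:Int)] (↑n + 1) = List.replicate (n+1) 1 := by
    rw [show ((n:Int) + 1) = ((n+1 : Nat) : Int) from by push_cast; ring,
        PySem.List.pyRepeat_singleton]
    simp
  have htup : ((List.replicate (n+1) (1:Int)), (List.replicate (n+1) (1:Int)), (1:Int), (1:Int))
      = ((List.range 1).map (Ffact p) ++ List.replicate (n + 1 - 1) 1,
         (List.range 1).map (Gfact p) ++ List.replicate (n + 1 - 1) 1,
         Ffact p (1-1), Gfact p (1-1)) := by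
    simp [Ffact, Gfact_zero p hp, List.replicate_succ]
  have := foldB_aux p hp n n 1 (by omega) (by omega)
  simp only [Nat.cast_one] at this
  rw [hrep, htup, this]

-- with no iteration (N ≤ 0) both programs return the untouched preallocated tables
theorem ports_nonpos (N p : Int) (hN : N ≤ 0) : batch_nCk N p = batch_nCk_alt N p := by
  unfold batch_nCk batch_nCk_alt
  rw [PySem.List.pyRange_one_eq_nil (by omega)]
  simp

-- ===== VERDICT (by name: the statement is the Claim_ definition above) =====
theorem batch_nCk_spec : Claim_equal_batch_nCk := by
  intro N p _ hpre
  unfold Spec_batch_nCk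
  by_cases hN : 0 ≤ N ∧ 2 ≤ p
  · rw [portA_eq N p hN.1 hN.2, portB_eq N p hN.1 hN.2]
  · have hN0 : N ≤ 0 := by
      rcases hpre with h | h
      · exact h
      · by_contra hc; exact hN ⟨by omega, h⟩
    exact ports_nonpos N p hN0
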